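-- pv_equiv track=rewrite | github.com/planetis-m/kdeai | kdeai/glossary.py | _select_translation
-- ===== SOURCE A (Python) =====
-- from typing import Iterable, Mapping, Sequence
--
-- def _select_translation(msgstr: str, msgstr_plural: Mapping[str, str]) -> str:
--     if msgstr.strip():
--         return msgstr
--     for key in sorted(msgstr_plural.keys()):
--         value = str(msgstr_plural[key])
--         if value.strip():
--             return value
--     return ""
-- ===== SOURCE B (Python) =====
-- def _select_translation(msgstr: str, msgstr_plural) -> str:
--     if msgstr.strip():
--         return msgstr
--     valid = [key for key in msgstr_plural if str(msgstr_plural[key]).strip()]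
--     if valid:
--         return str(msgstr_plural[min(valid)])
--     return ""
-- ===== Notes on version B (the rewrite author's own statement) =====
-- stated objective: simpler
-- what changed: Replaced the sort-all-keys-then-scan-for-first-nonblank loop with a single filter of the keys whose value strips nonblank followed by one min(), so no sorting and no early-exit scan.
import Mathlib
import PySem

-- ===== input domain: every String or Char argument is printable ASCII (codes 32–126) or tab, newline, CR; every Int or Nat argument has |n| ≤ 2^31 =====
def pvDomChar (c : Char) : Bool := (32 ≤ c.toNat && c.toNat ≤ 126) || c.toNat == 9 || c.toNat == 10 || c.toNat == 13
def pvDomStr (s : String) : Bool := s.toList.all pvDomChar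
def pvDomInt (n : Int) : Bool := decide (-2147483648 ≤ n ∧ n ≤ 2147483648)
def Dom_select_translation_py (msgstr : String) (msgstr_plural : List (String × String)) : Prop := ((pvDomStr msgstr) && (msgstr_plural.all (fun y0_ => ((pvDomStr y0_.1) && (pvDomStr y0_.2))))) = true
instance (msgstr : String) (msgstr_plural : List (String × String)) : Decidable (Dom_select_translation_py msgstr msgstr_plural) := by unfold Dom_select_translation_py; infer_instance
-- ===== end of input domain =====

-- B changes structure only: filter valid keys then take min, instead of sorting keys and scanning for the first non-blank value.

-- ===== PORT A =====
-- the 'for key in sorted(...): ... return value' loop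
def pvALoop (d : PySem.Dict String String) : List String → String
  | [] => ""
  | k :: ks =>
      let value := d.getD k ""        -- str(msgstr_plural[key]); key is from d.keys so always present
      if PySem.Str.strip value ≠ "" then value else pvALoop d ks

def select_translation_py (msgstr : String) (msgstr_plural : List (String × String)) : String :=
  if PySem.Str.strip msgstr ≠ "" then msgstr
  else
    let d := PySem.Dict.ofList msgstr_plural
    pvALoop d (PySem.List.sorted (PySem.Dict.keys d) (fun k => k) false)

-- ===== PORT B =====
def select_translation_py_alt (msgstr : String) (msgstr_plural : List (String × String)) : String :=
  if PySem.Str.strip msgstr ≠ "" then msgstr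
  else
    let d := PySem.Dict.ofList msgstr_plural
    let valid := (PySem.Dict.keys d).filter (fun k => PySem.Str.strip (d.getD k "") ≠ "")
    match PySem.List.min? valid (fun k => k) with
    | some k => d.getD k ""
    | none => ""

-- ===== PRECONDITION & SPEC =====
def Spec_select_translation_py (msgstr : String) (msgstr_plural : List (String × String)) (out : String) : Prop := out = select_translation_py_alt msgstr msgstr_plural
instance (msgstr : String) (msgstr_plural : List (String × String)) (out : String) : Decidable (Spec_select_translation_py msgstr msgstr_plural out) := by unfold Spec_select_translation_py; infer_instance

-- ===== CLAIM (what is proved, stated in full; the proofs are below) =====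
def Claim_equal_select_translation_py : Prop := ∀ (msgstr : String) (msgstr_plural : List (String × String)), Dom_select_translation_py msgstr msgstr_plural → Spec_select_translation_py msgstr msgstr_plural (select_translation_py msgstr msgstr_plural)

-- ===== LEMMAS AND PROOFS =====

-- A's loop returns the value of the first key (in the given order) whose value strips non-blank.
theorem pvALoop_eq_find (d : PySem.Dict String String) (s : List String) :
    pvALoop d s = (match s.find? (fun k => PySem.Str.strip (d.getD k "") ≠ "") with
                   | some k => d.getD k ""
                   | none => "") := by
  induction s with
  | nil => rfl
  | cons k ks ih =>
      by_cases h : PySem.Str.strip (d.getD k "") ≠ ""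
      · simp [pvALoop, List.find?, h]
      · simp [pvALoop, List.find?, h, ih]

-- the first satisfying element of a ≤-sorted list is ≤ every satisfying element
theorem pv_find_isMin {s : List String} {P : String → Bool} {m : String}
    (hp : s.Pairwise (fun a b => a ≤ b)) (h : s.find? P = some m) :
    ∀ x ∈ s, P x → m ≤ x := by
  induction s with
  | nil => simp at h
  | cons k ks ih =>
      rw [List.pairwise_cons] at hp
      by_cases hk : P k = true
      · rw [List.find?_cons_of_pos hk] at h
        injection h with h
        subst h
        intro x hx _
        rcases List.mem_cons.mp hx with rfl | hx
        · exact le_refl x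
        · exact hp.1 x hx
      · rw [List.find?_cons_of_neg hk] at h
        intro x hx hPx
        rcases List.mem_cons.mp hx with rfl | hx
        · exact absurd hPx hk
        · exact ih hp.2 h x hx hPx

theorem pv_main (d : PySem.Dict String String) :
    pvALoop d (PySem.List.sorted (PySem.Dict.keys d) (fun k => k) false) =
      (match PySem.List.min?
          ((PySem.Dict.keys d).filter (fun k => PySem.Str.strip (d.getD k "") ≠ ""))
          (fun k => k) with
       | some k => d.getD k ""
       | none => "") := by
  set P : String → Bool := fun k => PySem.Str.strip (d.getD k "") ≠ "" with hP
  set ks := PySem.Dict.keys d with hks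
  set s := PySem.List.sorted ks (fun k => k) false with hs
  have hperm : s.Perm ks := PySem.List.sorted_perm ks (fun k => k) false
  have hpair : s.Pairwise (fun a b => a ≤ b) := PySem.List.sorted_pairwise ks (fun k => k)
  rw [pvALoop_eq_find]
  rcases hfind : s.find? P with _ | m
  · -- no satisfying key: the filter is empty
    have hnone : ∀ x ∈ ks, ¬ P x = true := by
      intro x hx
      exact List.find?_eq_none.mp hfind x (hperm.mem_iff.mpr hx)
    have : ks.filter P = [] := List.filter_eq_nil_iff.mpr hnone
    rw [this]
    have : PySem.List.min? ([] : List String) (fun k => k) = none := by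
      simp [PySem.List.min?]
    simp [this]
  · have hPm : P m = true := List.find?_some hfind
    have hmem : m ∈ s := List.mem_of_find?_eq_some hfind
    have hmf : m ∈ ks.filter P :=
      List.mem_filter.mpr ⟨hperm.mem_iff.mp hmem, hPm⟩
    rcases hmin : PySem.List.min? (ks.filter P) (fun k => k) with _ | m'
    · rw [PySem.List.min?_eq_none_iff] at hmin
      rw [hmin] at hmf; simp at hmf
    · have hm'f : m' ∈ ks.filter P := PySem.List.min?_mem hmin
      have h1 : m' ≤ m := PySem.List.min?_isMin hmin m hmf
      have h2 : m ≤ m' := by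
        rcases List.mem_filter.mp hm'f with ⟨hm'ks, hPm'⟩
        exact pv_find_isMin hpair hfind m' (hperm.mem_iff.mpr hm'ks) hPm'
      have : m = m' := le_antisymm h2 h1
      simp [this]

-- ===== VERDICT (by name: the statement is the Claim_ definition above) =====
theorem select_translation_py_spec : Claim_equal_select_translation_py := by
  intro msgstr msgstr_plural _
  unfold Spec_select_translation_py select_translation_py select_translation_py_alt
  by_cases h : PySem.Str.strip msgstr ≠ ""
  · rw [if_pos h, if_pos h]
  · rw [if_neg h, if_neg h]
    exact pv_main (PySem.Dict.ofList msgstr_plural)
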